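-- pv_equiv track=rewrite | github.com/uqktiwar/ASTAP | X_all_python_scripts/master_splc_aux_funs.py | add_flanking_exons_by_tx
-- ===== SOURCE A (Python) =====
-- def add_flanking_exons_by_tx(f0exon, f1exon, splc, strand):
--
-- 	new_splc = []
-- 	for sc in splc.split(","):
-- 		if strand == "+":
-- 			if f0exon[0] != None:
-- 				sc = str(f0exon[0]) + "-" + str(f0exon[1]) + "^" + sc
-- 			if f0exon[0] == None:
-- 				sc = str(f0exon[1]) + "-" + sc
--
-- 			if f1exon[1] != None:
-- 				sc = sc + str(f1exon[0]) + "-" + str(f1exon[1]) + "^"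
-- 			if f1exon[1] == None:
-- 				sc = sc + str(f1exon[0]) + "^"
--
--
-- 		if strand == "-":
-- 			if f0exon[0] != None:
-- 				sc = sc + str(f0exon[1]) + "-" + str(f0exon[0]) + "^"
-- 			if f0exon[0] == None:
-- 				sc = sc + str(f0exon[1]) + "^"
--
-- 			if f1exon[1] != None:
-- 				sc = str(f1exon[1]) + "-" + str(f1exon[0]) + "^" + sc
-- 			if f1exon[1] == None:
-- 				sc = str(f1exon[0]) + "-" + sc
--
-- 		new_splc.append(sc)
--
-- 	new_splc = ",".join(new_splc)
--
-- 	return new_splc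
-- ===== SOURCE B (Python) =====
-- def add_flanking_exons_by_tx(f0exon, f1exon, splc, strand):
--     prefix = ""
--     suffix = ""
--     if strand == "+":
--         if f0exon[0] is not None:
--             prefix = str(f0exon[0]) + "-" + str(f0exon[1]) + "^"
--         else:
--             prefix = str(f0exon[1]) + "-"
--         if f1exon[1] is not None:
--             suffix = str(f1exon[0]) + "-" + str(f1exon[1]) + "^"
--         else:
--             suffix = str(f1exon[0]) + "^"
--     elif strand == "-":
--         if f1exon[1] is not None:
--             prefix = str(f1exon[1]) + "-" + str(f1exon[0]) + "^"
--         else: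
--             prefix = str(f1exon[0]) + "-"
--         if f0exon[0] is not None:
--             suffix = str(f0exon[1]) + "-" + str(f0exon[0]) + "^"
--         else:
--             suffix = str(f0exon[1]) + "^"
--     return prefix + splc.replace(",", suffix + "," + prefix) + suffix
-- ===== Notes on version B (the rewrite author's own statement) =====
-- stated objective: simpler
-- what changed: B hoists the strand/flank-dependent prefix and suffix (constant across the loop) out of A's per-segment loop and produces the result with a single splc.replace(",", suffix+","+prefix) wrapped in prefix/suffix, instead of split, per-piece conditional rebuilding, and join.
import Mathlib
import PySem

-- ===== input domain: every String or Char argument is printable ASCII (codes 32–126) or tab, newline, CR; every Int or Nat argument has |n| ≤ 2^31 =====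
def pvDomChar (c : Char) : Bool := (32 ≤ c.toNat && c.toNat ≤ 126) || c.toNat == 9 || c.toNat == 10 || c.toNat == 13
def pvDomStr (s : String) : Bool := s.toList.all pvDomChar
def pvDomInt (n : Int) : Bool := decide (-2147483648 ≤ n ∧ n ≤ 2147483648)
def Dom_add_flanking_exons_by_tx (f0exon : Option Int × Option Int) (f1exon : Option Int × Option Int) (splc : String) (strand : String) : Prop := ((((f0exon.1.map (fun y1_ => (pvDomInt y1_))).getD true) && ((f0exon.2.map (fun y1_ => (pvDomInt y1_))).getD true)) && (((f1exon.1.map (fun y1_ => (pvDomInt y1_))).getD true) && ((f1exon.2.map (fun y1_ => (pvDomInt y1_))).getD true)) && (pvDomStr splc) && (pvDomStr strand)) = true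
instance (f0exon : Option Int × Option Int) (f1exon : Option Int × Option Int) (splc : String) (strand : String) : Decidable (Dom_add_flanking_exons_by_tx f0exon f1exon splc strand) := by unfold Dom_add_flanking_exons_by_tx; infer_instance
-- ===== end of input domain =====

-- B hoists the constant prefix/suffix out of A's per-segment loop and builds the result with one
-- splc.replace(",", suffix + "," + prefix) instead of split / per-piece rebuild / join (objective: simpler).

-- str(x) for an Option Int value: "None" for None, Python's str(int) otherwise (shared by both ports)
def pyStrOpt (o : Option Int) : List Char :=
  match o with
  | some n => PySem.Int.toChars n
  | none => ['N', 'o', 'n', 'e']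

-- ===== PORT A =====
-- the body of A's for-loop (one segment sc), transcribed statement by statement
def aBody (f0exon : Option Int × Option Int) (f1exon : Option Int × Option Int) (strand : String) (sc : List Char) : List Char :=
  let sc :=
    if strand = "+" then
      let sc := if f0exon.1 ≠ none then pyStrOpt f0exon.1 ++ ['-'] ++ pyStrOpt f0exon.2 ++ ['^'] ++ sc else sc
      let sc := if f0exon.1 = none then pyStrOpt f0exon.2 ++ ['-'] ++ sc else sc
      let sc := if f1exon.2 ≠ none then sc ++ pyStrOpt f1exon.1 ++ ['-'] ++ pyStrOpt f1exon.2 ++ ['^'] else sc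
      if f1exon.2 = none then sc ++ pyStrOpt f1exon.1 ++ ['^'] else sc
    else sc
  if strand = "-" then
    let sc := if f0exon.1 ≠ none then sc ++ pyStrOpt f0exon.2 ++ ['-'] ++ pyStrOpt f0exon.1 ++ ['^'] else sc
    let sc := if f0exon.1 = none then sc ++ pyStrOpt f0exon.2 ++ ['^'] else sc
    let sc := if f1exon.2 ≠ none then pyStrOpt f1exon.2 ++ ['-'] ++ pyStrOpt f1exon.1 ++ ['^'] ++ sc else sc
    if f1exon.2 = none then pyStrOpt f1exon.1 ++ ['-'] ++ sc else sc
  else sc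

def add_flanking_exons_by_tx (f0exon : Option Int × Option Int) (f1exon : Option Int × Option Int) (splc : String) (strand : String) : String :=
  let new_splc : List (List Char) :=
    (PySem.Chars.splitOn splc.toList [',']).foldl
      (fun acc sc => acc ++ [aBody f0exon f1exon strand sc]) []
  String.ofList (PySem.Chars.join [','] new_splc)

-- ===== PORT B =====
def flankPrefix (f0exon : Option Int × Option Int) (f1exon : Option Int × Option Int) (strand : String) : List Char :=
  if strand = "+" then
    if f0exon.1 ≠ none then pyStrOpt f0exon.1 ++ ['-'] ++ pyStrOpt f0exon.2 ++ ['^']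
    else pyStrOpt f0exon.2 ++ ['-']
  else if strand = "-" then
    if f1exon.2 ≠ none then pyStrOpt f1exon.2 ++ ['-'] ++ pyStrOpt f1exon.1 ++ ['^']
    else pyStrOpt f1exon.1 ++ ['-']
  else []

def flankSuffix (f0exon : Option Int × Option Int) (f1exon : Option Int × Option Int) (strand : String) : List Char :=
  if strand = "+" then
    if f1exon.2 ≠ none then pyStrOpt f1exon.1 ++ ['-'] ++ pyStrOpt f1exon.2 ++ ['^']
    else pyStrOpt f1exon.1 ++ ['^']
  else if strand = "-" then
    if f0exon.1 ≠ none then pyStrOpt f0exon.2 ++ ['-'] ++ pyStrOpt f0exon.1 ++ ['^']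
    else pyStrOpt f0exon.2 ++ ['^']
  else []

def add_flanking_exons_by_tx_alt (f0exon : Option Int × Option Int) (f1exon : Option Int × Option Int) (splc : String) (strand : String) : String :=
  let pre := flankPrefix f0exon f1exon strand
  let suf := flankSuffix f0exon f1exon strand
  String.ofList (pre ++ PySem.Chars.replace splc.toList [','] (suf ++ [','] ++ pre) ++ suf)

-- ===== PRECONDITION & SPEC =====
def Spec_add_flanking_exons_by_tx (f0exon : Option Int × Option Int) (f1exon : Option Int × Option Int) (splc : String) (strand : String) (out : String) : Prop := out = add_flanking_exons_by_tx_alt f0exon f1exon splc strand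
instance (f0exon : Option Int × Option Int) (f1exon : Option Int × Option Int) (splc : String) (strand : String) (out : String) : Decidable (Spec_add_flanking_exons_by_tx f0exon f1exon splc strand out) := by unfold Spec_add_flanking_exons_by_tx; infer_instance

-- ===== CLAIM (what is proved, stated in full; the proofs are below) =====
def Claim_equal_add_flanking_exons_by_tx : Prop := ∀ (f0exon : Option Int × Option Int) (f1exon : Option Int × Option Int) (splc : String) (strand : String), Dom_add_flanking_exons_by_tx f0exon f1exon splc strand → Spec_add_flanking_exons_by_tx f0exon f1exon splc strand (add_flanking_exons_by_tx f0exon f1exon splc strand)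

-- ===== LEMMAS AND PROOFS =====

-- accumulator of replace.go is a pure reversed prefix
theorem replace_go_acc (old new : List Char) (fuel : Nat) : ∀ (l acc : List Char),
    PySem.Chars.replace.go old new fuel l acc = acc.reverse ++ PySem.Chars.replace.go old new fuel l [] := by
  induction fuel with
  | zero => intro l acc; simp [PySem.Chars.replace.go]
  | succ f ih =>
    intro l acc
    cases l with
    | nil => simp [PySem.Chars.replace.go]
    | cons c t =>
      simp only [PySem.Chars.replace.go]
      split
      · rw [ih _ (new.reverse ++ acc), ih _ (new.reverse ++ [])]
        simp
      · rw [ih _ (c :: acc), ih _ [c]]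
        simp

-- accumulator of splitOn.go is a pure reversed list of finished pieces
theorem splitOn_go_acc (sep : List Char) (fuel : Nat) : ∀ (l cur : List Char) (acc : List (List Char)),
    PySem.Chars.splitOn.go sep fuel l cur acc = acc.reverse ++ PySem.Chars.splitOn.go sep fuel l cur [] := by
  induction fuel with
  | zero => intro l cur acc; simp [PySem.Chars.splitOn.go]
  | succ f ih =>
    intro l cur acc
    cases l with
    | nil => simp [PySem.Chars.splitOn.go]
    | cons c t =>
      simp only [PySem.Chars.splitOn.go]
      split
      · rw [ih _ [] (cur.reverse :: acc), ih _ [] [cur.reverse]]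
        simp
      · rw [ih _ (c :: cur) acc]

-- the current-piece accumulator prefixes the head of the result
theorem splitOn_go_cur (sep : List Char) (fuel : Nat) : ∀ (l cur : List Char),
    PySem.Chars.splitOn.go sep fuel l cur [] =
      (cur.reverse ++ (PySem.Chars.splitOn.go sep fuel l [] []).headI) ::
        (PySem.Chars.splitOn.go sep fuel l [] []).tail := by
  induction fuel with
  | zero => intro l cur; simp [PySem.Chars.splitOn.go]
  | succ f ih =>
    intro l cur
    cases l with
    | nil => simp [PySem.Chars.splitOn.go]
    | cons c t =>
      simp only [PySem.Chars.splitOn.go]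
      split
      · rw [splitOn_go_acc sep f _ [] [cur.reverse], splitOn_go_acc sep f _ [] [List.reverse []]]
        simp
      · rw [ih t (c :: cur), ih t [c]]
        simp

-- join over a cons with a char pushed onto the head piece
theorem join_cons_head (new : List Char) (c : Char) (p : List Char) (ps : List (List Char)) :
    PySem.Chars.join new ((c :: p) :: ps) = c :: PySem.Chars.join new (p :: ps) := by
  cases ps with
  | nil => simp [PySem.Chars.join_singleton]
  | cons q r => rw [PySem.Chars.join_cons_cons, PySem.Chars.join_cons_cons]; simp

-- core: str.replace(s, sep, new) is new.join(s.split(sep)), fuel-robust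
theorem replace_go_eq_join_splitOn_go (old new : List Char) (hold : old ≠ []) (f1 : Nat) :
    ∀ (f2 : Nat) (l : List Char), l.length ≤ f1 → l.length ≤ f2 →
      PySem.Chars.replace.go old new f1 l [] =
        PySem.Chars.join new (PySem.Chars.splitOn.go old f2 l [] []) := by
  induction f1 with
  | zero =>
    intro f2 l h1 _
    have : l = [] := List.length_eq_zero_iff.mp (Nat.le_zero.mp h1)
    subst this
    cases f2 <;> simp [PySem.Chars.replace.go, PySem.Chars.splitOn.go, PySem.Chars.join_singleton]
  | succ f ih =>
    intro f2 l h1 h2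
    cases l with
    | nil =>
      cases f2 <;> simp [PySem.Chars.replace.go, PySem.Chars.splitOn.go, PySem.Chars.join_singleton]
    | cons c t =>
      cases f2 with
      | zero => simp at h2
      | succ g =>
        simp only [PySem.Chars.replace.go, PySem.Chars.splitOn.go]
        split
        · rename_i hpre
          have hdrop : (List.drop old.length (c :: t)).length ≤ f := by
            have : 1 ≤ old.length := by
              cases old with | nil => exact absurd rfl hold | cons _ _ => simp
            simp only [List.length_drop, List.length_cons]
            simp only [List.length_cons] at h1
            omega
          have hdrop2 : (List.drop old.length (c :: t)).length ≤ g := by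
            have : 1 ≤ old.length := by
              cases old with | nil => exact absurd rfl hold | cons _ _ => simp
            simp only [List.length_drop, List.length_cons]
            simp only [List.length_cons] at h2
            omega
          rw [replace_go_acc, splitOn_go_acc old g _ [] [List.reverse []]]
          rw [ih g _ hdrop hdrop2]
          rcases hG : PySem.Chars.splitOn.go old g (List.drop old.length (c :: t)) [] [] with _ | ⟨p, ps⟩
          · exact absurd (splitOn_go_cur old g (List.drop old.length (c :: t)) [] ▸ hG) (by simp)
          · simp [PySem.Chars.join_cons_cons]
        · have ht1 : t.length ≤ f := by simp only [List.length_cons] at h1; omega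
          have ht2 : t.length ≤ g := by simp only [List.length_cons] at h2; omega
          rw [replace_go_acc, splitOn_go_cur old g t [c], ih g t ht1 ht2]
          rcases hG : PySem.Chars.splitOn.go old g t [] [] with _ | ⟨p, ps⟩
          · exact absurd (splitOn_go_cur old g t [] ▸ hG) (by simp)
          · simp only [List.headI, List.tail]
            rw [show ([c].reverse ++ p) = c :: p by simp, join_cons_head]
            simp [PySem.Chars.join]

theorem replace_eq_join_splitOn (s old new : List Char) (hold : old ≠ []) :
    PySem.Chars.replace s old new = PySem.Chars.join new (PySem.Chars.splitOn s old) := by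
  rw [PySem.Chars.replace, PySem.Chars.splitOn, if_neg (by simpa using hold)]
  exact replace_go_eq_join_splitOn_go old new hold s.length (s.length + 1) s le_rfl (by omega)

-- joining decorated pieces = decorate once around a join with the fused separator
theorem join_map_decorate (pre suf sep : List Char) : ∀ (ps : List (List Char)) (p : List Char),
    PySem.Chars.join sep ((p :: ps).map (fun x => pre ++ x ++ suf)) =
      pre ++ PySem.Chars.join (suf ++ sep ++ pre) (p :: ps) ++ suf := by
  intro ps
  induction ps with
  | nil => intro p; simp [PySem.Chars.join_singleton]
  | cons q r ih =>
    intro p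
    have hq := ih q
    simp only [List.map_cons] at hq ⊢
    rw [PySem.Chars.join_cons_cons, PySem.Chars.join_cons_cons, hq]
    simp

-- A's per-piece transformation is the constant decoration
theorem body_eq_decorate (f0exon f1exon : Option Int × Option Int) (strand : String) (sc : List Char) :
    aBody f0exon f1exon strand sc =
      flankPrefix f0exon f1exon strand ++ sc ++ flankSuffix f0exon f1exon strand := by
  by_cases hp : strand = "+"
  · have hm : ¬ strand = "-" := by rw [hp]; decide
    rcases f0exon with ⟨o1, o2⟩; rcases f1exon with ⟨p1, p2⟩
    cases o1 <;> cases p2 <;> simp [aBody, hp, flankPrefix, flankSuffix]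
  · by_cases hm : strand = "-"
    · rcases f0exon with ⟨o1, o2⟩; rcases f1exon with ⟨p1, p2⟩
      cases o1 <;> cases p2 <;> simp [aBody, hm, flankPrefix, flankSuffix]
    · simp [aBody, hp, hm, flankPrefix, flankSuffix]

-- ===== VERDICT (by name: the statement is the Claim_ definition above) =====
theorem add_flanking_exons_by_tx_spec : Claim_equal_add_flanking_exons_by_tx := by
  intro f0exon f1exon splc strand _
  show add_flanking_exons_by_tx f0exon f1exon splc strand = add_flanking_exons_by_tx_alt f0exon f1exon splc strand
  unfold add_flanking_exons_by_tx add_flanking_exons_by_tx_alt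
  dsimp only
  rw [PySem.List.foldl_append_singleton_eq_map]
  rw [replace_eq_join_splitOn splc.toList [','] _ (by simp)]
  rcases hP : PySem.Chars.splitOn splc.toList [','] with _ | ⟨p, ps⟩
  · exfalso
    have := splitOn_go_cur [','] (splc.toList.length + 1) splc.toList []
    rw [PySem.Chars.splitOn] at hP
    rw [hP] at this
    exact absurd this (by simp)
  · rw [List.nil_append,
      List.map_congr_left (fun sc _ => body_eq_decorate f0exon f1exon strand sc),
      join_map_decorate]
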